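-- pv_equiv track=rewrite | github.com/marcoame2001/pacman_machine_learning | bustersAgents.py | replaceData
-- ===== SOURCE A (Python) =====
-- def replaceData(line):
--     char_to_replace = {"(": "",
--                        ")": "",
--                        "[": "",
--                        "]": ""}
--     for key, value in char_to_replace.items():
--         line = line.replace(key, value)
--     return line
-- ===== SOURCE B (Python) =====
-- def replaceData(line):
--     return ''.join(c for c in line if c not in {'(', ')', '[', ']'})
-- ===== Notes on version B (the rewrite author's own statement) =====
-- stated objective: idiomatic
-- what changed: Replaced four sequential str.replace scans (one per removed bracket character) with a single pass that filters those characters out of the string.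
import Mathlib
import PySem

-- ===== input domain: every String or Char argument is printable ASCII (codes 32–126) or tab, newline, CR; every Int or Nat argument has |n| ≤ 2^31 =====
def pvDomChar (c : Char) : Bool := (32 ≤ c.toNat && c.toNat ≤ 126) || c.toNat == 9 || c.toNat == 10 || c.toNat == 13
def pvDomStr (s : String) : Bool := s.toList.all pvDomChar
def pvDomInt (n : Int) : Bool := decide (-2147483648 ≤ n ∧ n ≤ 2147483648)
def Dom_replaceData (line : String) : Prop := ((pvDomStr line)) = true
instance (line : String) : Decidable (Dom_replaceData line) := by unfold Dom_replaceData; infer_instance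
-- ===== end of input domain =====

-- B replaces A's four sequential str.replace scans with one character-filtering pass (idiomatic; same result).

-- ===== PORT A =====
-- A iterates over the dict {"(": "", ")": "", "[": "", "]": ""} in insertion order,
-- doing line = line.replace(key, value) for each entry.
def replaceData (line : String) : String :=
  (PySem.Dict.items (((((PySem.Dict.empty : PySem.Dict String String).insert "(" "").insert ")" "").insert "[" "").insert "]" "")).foldl
    (fun acc kv => PySem.Str.replace acc kv.1 kv.2) line

-- ===== PORT B =====
-- ''.join(c for c in line if c not in {'(', ')', '[', ']'})
def replaceData_alt (line : String) : String :=
  PySem.Str.join ""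
    ((line.toList.filter (fun c => !(PySem.Set.ofList ['(', ')', '[', ']']).contains c)).map
      (fun c => String.ofList [c]))

-- ===== PRECONDITION & SPEC =====
def Spec_replaceData (line : String) (out : String) : Prop := out = replaceData_alt line
instance (line : String) (out : String) : Decidable (Spec_replaceData line out) := by unfold Spec_replaceData; infer_instance

-- ===== CLAIM (what is proved, stated in full; the proofs are below) =====
def Claim_equal_replaceData : Prop := ∀ (line : String), Dom_replaceData line → Spec_replaceData line (replaceData line)

-- ===== LEMMAS AND PROOFS =====

-- replace.go with a single-char pattern and empty replacement filters that char out
theorem replace_go_single (k : Char) (fuel : Nat) (l acc : List Char)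
    (h : l.length ≤ fuel) :
    PySem.Chars.replace.go [k] [] fuel l acc = acc.reverse ++ l.filter (fun c => c != k) := by
  induction fuel generalizing l acc with
  | zero =>
    have : l = [] := List.eq_nil_of_length_eq_zero (Nat.le_zero.mp h)
    subst this
    simp [PySem.Chars.replace.go]
  | succ n ih =>
    cases l with
    | nil => simp [PySem.Chars.replace.go]
    | cons c t =>
      have ht : t.length ≤ n := Nat.lt_succ_iff.mp (by simpa using h)
      simp only [PySem.Chars.replace.go]
      by_cases hk : k = c
      · subst hk
        simp only [List.isPrefixOf, beq_self_eq_true, Bool.and_self,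
          if_pos, List.drop_succ_cons, List.reverse_nil, List.nil_append,
          List.length_cons, List.length_nil, List.drop_zero]
        rw [ih t acc ht]
        simp [List.filter]
      · have hpre : [k].isPrefixOf (c :: t) = false := by
          simp [List.isPrefixOf, hk]
        rw [hpre]
        simp only [Bool.false_eq_true, if_false]
        rw [ih t (c :: acc) ht]
        have hc : (c != k) = true := by simp [Ne.symm hk]
        simp [List.filter, hc]

-- s.replace(k, '') for a single char k is the filter dropping k
theorem replace_single (s : List Char) (k : Char) :
    PySem.Chars.replace s [k] [] = s.filter (fun c => c != k) := by
  simp only [PySem.Chars.replace, List.isEmpty_cons, Bool.false_eq_true, if_false]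
  simpa using replace_go_single k s.length s [] (le_refl _)

-- the two filter predicates agree on every character
theorem pred_eq (c : Char) :
    ((((c != '(') && (c != ')')) && (c != '[')) && (c != ']'))
      = !(PySem.Set.ofList ['(', ')', '[', ']']).contains c := by
  by_cases h1 : c = '(' <;> by_cases h2 : c = ')' <;> by_cases h3 : c = '[' <;>
    by_cases h4 : c = ']' <;>
    simp_all [PySem.Set.ofList, PySem.Set.add, PySem.Set.contains, PySem.Set.empty]

-- ===== VERDICT (by name: the statement is the Claim_ definition above) =====
theorem replaceData_spec : Claim_equal_replaceData := by
  intro line _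
  show replaceData line = replaceData_alt line
  have hitems : PySem.Dict.items (((((PySem.Dict.empty : PySem.Dict String String).insert "(" "").insert ")" "").insert "[" "").insert "]" "")
      = [("(", ""), (")", ""), ("[", ""), ("]", "")] := rfl
  apply String.toList_injective
  rw [replaceData, replaceData_alt, hitems]
  simp only [List.foldl_cons, List.foldl_nil, PySem.Str.toList_join, List.map_map]
  rw [Function.comp_def]
  simp only [String.toList_ofList]
  rw [show ("" : String).toList = [] from rfl, PySem.Chars.join_nil_singletons]
  simp only [PySem.Str.toList_replace]
  have h1 : ("(" : String).toList = ['('] := rfl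
  have h2 : (")" : String).toList = [')'] := rfl
  have h3 : ("[" : String).toList = ['['] := rfl
  have h4 : ("]" : String).toList = [']'] := rfl
  have h0 : ("" : String).toList = [] := rfl
  rw [h0, h1, h2, h3, h4]
  rw [replace_single, replace_single, replace_single, replace_single]
  simp only [List.filter_filter]
  apply List.filter_congr
  intro c _
  simpa [Bool.and_comm, Bool.and_assoc, Bool.and_left_comm] using pred_eq c
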